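-- pv_equiv track=rewrite | github.com/JT76/Pauli_grouping_joint_measurements | JW_and_grouping.py | index_ordering
-- ===== SOURCE A (Python) =====
-- def index_ordering(edge_count):
--     index_list_descending = []
--     new_list = edge_count.copy()
--     dummy_edge_count = edge_count.copy()
--     for i in range(len(edge_count)):
--         max_new_list = max(new_list)
--         index_list_descending.append(dummy_edge_count.index(max_new_list))
--         dummy_edge_count[index_list_descending[-1]] = -1
--         new_list.pop(new_list.index(max_new_list))
--     assert len(index_list_descending)==len(edge_count)
--     return index_list_descending
-- ===== SOURCE B (Python) =====
-- def index_ordering(edge_count):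
--     return sorted(range(len(edge_count)), key=lambda i: (-edge_count[i], i))
-- ===== Notes on version B (the rewrite author's own statement) =====
-- stated objective: faster
-- what changed: Replaces A's n rounds of max()+list.index()+pop() with sentinel overwriting by a single stable sort of the index list under the key (-value, index).
-- intended difference: On lists where a -1 value occurs after some element that is at least -1, A's sentinel -1 collides with the genuine value -1 and A returns a duplicate index; B returns the intended argsort in which every index appears exactly once. — e.g. on index_ordering([0, -1]): A returns [0, 0], B returns [0, 1]
import Mathlib
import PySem

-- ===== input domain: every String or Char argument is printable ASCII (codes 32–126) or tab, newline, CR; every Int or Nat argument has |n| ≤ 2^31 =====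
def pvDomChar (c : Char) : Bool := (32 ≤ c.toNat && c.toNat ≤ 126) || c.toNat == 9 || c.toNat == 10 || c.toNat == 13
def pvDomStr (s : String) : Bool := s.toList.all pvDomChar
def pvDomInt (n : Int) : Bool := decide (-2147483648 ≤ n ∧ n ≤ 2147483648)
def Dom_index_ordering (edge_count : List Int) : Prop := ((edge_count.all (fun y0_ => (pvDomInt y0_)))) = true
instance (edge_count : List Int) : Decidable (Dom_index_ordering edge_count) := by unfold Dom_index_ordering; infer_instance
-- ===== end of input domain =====

-- B replaces A's quadratic repeated max/index/pop selection with one stable sort of the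
-- indices by the key (-value, index); return-value equivalence only (A mutates no argument).

-- ===== PORT A =====
-- literal port of A: n rounds; each takes max(new_list), finds it in dummy_edge_count,
-- overwrites that slot with the sentinel -1, and pops the first occurrence from new_list.
-- The 'none' fallbacks are unreachable (new_list is nonempty while the loop runs and its
-- max is present in dummy); Python's always-true assert is omitted.
def index_ordering (edge_count : List Int) : List Int :=
  (((PySem.List.pyRange 0 (PySem.List.len edge_count) 1).foldl
    (fun st _i =>
      match PySem.List.max? st.2.1 (fun x => x) with
      | none => st
      | some m =>
        match PySem.List.index? st.2.2 m with
        | none => st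
        | some j =>
          let ils := st.1 ++ [(j : Int)]
          let dm := st.2.2.set j (-1)
          match PySem.List.index? st.2.1 m with
          | none => (ils, st.2.1, dm)
          | some j2 =>
            match PySem.List.pop? st.2.1 (j2 : Int) with
            | none => (ils, st.2.1, dm)
            | some r => (ils, r.2, dm))
    (([] : List Int), edge_count, edge_count)) : List Int × List Int × List Int).1

-- ===== PORT B =====
-- port of Source B: sorted(range(len(edge_count)), key=lambda i: (-edge_count[i], i))
def index_ordering_alt (edge_count : List Int) : List Int :=
  PySem.List.sorted2 (PySem.List.pyRange 0 (PySem.List.len edge_count) 1)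
    (fun i => -(PySem.List.pyGetD edge_count i 0)) (fun i => i) false

-- ===== PRECONDITION & SPEC =====
-- On lists where a -1 value occurs after some element ≥ -1, A's -1 sentinel collides with the
-- real value -1 and A returns duplicate indices; B returns the intended argsort with each
-- index exactly once.
def D_index_ordering (edge_count : List Int) : Prop :=
  ∃ j : Fin edge_count.length, edge_count[j] = -1 ∧
    ∃ i : Fin edge_count.length, (i : Nat) < (j : Nat) ∧ -1 ≤ edge_count[i]
instance (edge_count : List Int) : Decidable (D_index_ordering edge_count) := by
  unfold D_index_ordering; infer_instance

def Spec_index_ordering (edge_count : List Int) (out : List Int) : Prop :=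
  ¬ D_index_ordering edge_count → out = index_ordering_alt edge_count
instance (edge_count : List Int) (out : List Int) : Decidable (Spec_index_ordering edge_count out) := by
  unfold Spec_index_ordering; infer_instance

def pvDiffWitness_index_ordering : List Int := [0, -1]
def pvDiffWitnessOut_index_ordering : (List Int) × (List Int) := ([0, 0], [0, 1])

-- ===== CLAIM (what is proved, stated in full; the proofs are below) =====
def Claim_unchanged_index_ordering : Prop := ∀ (edge_count : List Int), Dom_index_ordering edge_count → Spec_index_ordering edge_count (index_ordering edge_count)
def Claim_exact_index_ordering : Prop := ∀ (edge_count : List Int), Dom_index_ordering edge_count → D_index_ordering edge_count → index_ordering edge_count ≠ index_ordering_alt edge_count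
def Claim_changed_index_ordering : Prop := Dom_index_ordering (pvDiffWitness_index_ordering) ∧ D_index_ordering (pvDiffWitness_index_ordering) ∧ index_ordering (pvDiffWitness_index_ordering) = pvDiffWitnessOut_index_ordering.1 ∧ index_ordering_alt (pvDiffWitness_index_ordering) = pvDiffWitnessOut_index_ordering.2 ∧ pvDiffWitnessOut_index_ordering.1 ≠ pvDiffWitnessOut_index_ordering.2

-- ===== LEMMAS AND PROOFS =====

-- value at an (Int) index, and the strict lexicographic order "(-value, index)"
def pvVal (v : List Int) (i : Int) : Int := PySem.List.pyGetD v i 0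

def pvP (v : List Int) (a b : Int) : Prop :=
  pvVal v b < pvVal v a ∨ (pvVal v a = pvVal v b ∧ a < b)

-- the comparison function sorted2 uses for B's key, named
def pvBefore (v : List Int) (a b : Int) : Bool :=
  decide ((-(PySem.List.pyGetD v a 0)) < -(PySem.List.pyGetD v b 0)) ||
    (!decide ((-(PySem.List.pyGetD v b 0)) < -(PySem.List.pyGetD v a 0)) && decide (a < b))

theorem pvBefore_iff (v : List Int) (a b : Int) : pvBefore v a b = true ↔ pvP v a b := by
  unfold pvBefore pvP pvVal
  simp only [Bool.or_eq_true, Bool.and_eq_true, Bool.not_eq_true', decide_eq_true_eq,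
    decide_eq_false_iff_not]
  omega

theorem pvP_trans (v : List Int) {a b c : Int} (h1 : pvP v a b) (h2 : pvP v b c) : pvP v a c := by
  unfold pvP at *; omega

theorem pvP_total (v : List Int) {a b : Int} (h : a ≠ b) : pvP v a b ∨ pvP v b a := by
  unfold pvP; omega

theorem pvP_irrefl (v : List Int) (a : Int) : ¬ pvP v a a := by
  unfold pvP; omega

theorem pvInsertBy_pairwise (v : List Int) (x : Int) (ys : List Int) (hx : x ∉ ys)
    (hp : ys.Pairwise (pvP v)) :
    (PySem.List.insertBy (pvBefore v) x ys).Pairwise (pvP v) := by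
  induction ys with
  | nil => simp [PySem.List.insertBy]
  | cons y ys ih =>
    rw [PySem.List.insertBy]
    by_cases hb : pvBefore v x y = true
    · rw [if_pos hb]
      have hxy : pvP v x y := (pvBefore_iff v x y).mp hb
      refine List.Pairwise.cons ?_ hp
      intro z hz
      rcases List.mem_cons.mp hz with rfl | hz
      · exact hxy
      · exact pvP_trans v hxy (List.rel_of_pairwise_cons hp hz)
    · rw [if_neg hb]
      have hxne : x ∉ ys := fun h => hx (List.mem_cons_of_mem _ h)
      refine List.Pairwise.cons ?_ (ih hxne (List.Pairwise.of_cons hp))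
      intro z hz
      rcases (PySem.List.mem_insertBy _ _ _ _).mp hz with rfl | hz
      · have hne : y ≠ z := fun h => hx (h ▸ List.mem_cons_self)
        rcases pvP_total v hne.symm with h | h
        · exact absurd ((pvBefore_iff v z y).mpr h) hb
        · exact h
      · exact List.rel_of_pairwise_cons hp hz

theorem pvFoldl_insertBy_pairwise (v : List Int) :
    ∀ (xs acc : List Int), xs.Nodup → (∀ x ∈ xs, x ∉ acc) → acc.Pairwise (pvP v) →
    (xs.foldl (fun acc x => PySem.List.insertBy (pvBefore v) x acc) acc).Pairwise (pvP v) := by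
  intro xs
  induction xs with
  | nil => intro acc _ _ h; simpa using h
  | cons x xs ih =>
    intro acc hnd hnin hp
    rw [List.foldl_cons]
    refine ih _ (List.Nodup.of_cons hnd) ?_
      (pvInsertBy_pairwise v x acc (hnin x List.mem_cons_self) hp)
    intro y hy hmem
    rcases (PySem.List.mem_insertBy _ _ _ _).mp hmem with rfl | hmem
    · exact (List.nodup_cons.mp hnd).1 hy
    · exact hnin y (List.mem_cons_of_mem _ hy) hmem

theorem pvAlt_eq_foldl (v : List Int) :
    index_ordering_alt v =
      (PySem.List.pyRange 0 (PySem.List.len v) 1).foldl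
        (fun acc x => PySem.List.insertBy (pvBefore v) x acc) [] := rfl

theorem pvAlt_pairwise (v : List Int) : (index_ordering_alt v).Pairwise (pvP v) := by
  rw [pvAlt_eq_foldl]
  exact pvFoldl_insertBy_pairwise v _ [] (PySem.List.nodup_pyRange_one 0 _)
    (by simp) (by simp)

theorem pvAlt_perm (v : List Int) :
    (index_ordering_alt v).Perm (PySem.List.pyRange 0 (PySem.List.len v) 1) :=
  PySem.List.sorted2_perm _ _ _ _

theorem pvAlt_unique (v : List Int) (ys : List Int)
    (hperm : ys.Perm (PySem.List.pyRange 0 (PySem.List.len v) 1))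
    (hp : ys.Pairwise (pvP v)) : index_ordering_alt v = ys := by
  refine List.eq_of_perm_of_sorted ?_ (pvAlt_pairwise v) hp
    ((pvAlt_perm v).trans hperm.symm)
  intro a b _ _ h1 h2
  exact absurd (pvP_trans v h1 h2) (pvP_irrefl v a)

-- the loop body of A, named for the invariant proof (definitionally the port's body)
def pvBody (st : List Int × List Int × List Int) : List Int × List Int × List Int :=
  match PySem.List.max? st.2.1 (fun x => x) with
  | none => st
  | some m =>
    match PySem.List.index? st.2.2 m with
    | none => st
    | some j =>
      let ils := st.1 ++ [(j : Int)]
      let dm := st.2.2.set j (-1)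
      match PySem.List.index? st.2.1 m with
      | none => (ils, st.2.1, dm)
      | some j2 =>
        match PySem.List.pop? st.2.1 (j2 : Int) with
        | none => (ils, st.2.1, dm)
        | some r => (ils, r.2, dm)

theorem pvA_eq_foldl (v : List Int) :
    index_ordering v =
      ((PySem.List.pyRange 0 (PySem.List.len v) 1).foldl (fun st _ => pvBody st)
        (([] : List Int), v, v)).1 := rfl

-- loop invariant: st = (picked, new_list, dummy), R = the unpicked indices in increasing order
def pvInv (v : List Int) (st : List Int × List Int × List Int) (R : List Int) : Prop :=
  (st.1 ++ R).Perm (PySem.List.pyRange 0 (PySem.List.len v) 1) ∧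
  st.2.1 = R.map (pvVal v) ∧
  st.2.2.length = v.length ∧
  (∀ k : Nat, k < v.length →
      st.2.2.getD k 0 = if ((k : Int) ∈ st.1) then -1 else v.getD k 0) ∧
  R.Pairwise (· < ·) ∧
  st.1.Pairwise (pvP v) ∧
  (∀ i ∈ st.1, ∀ r ∈ R, pvP v i r)

theorem pvCons_eraseIdx (xs : List Int) (i : Nat) (h : i < xs.length) :
    xs.Perm (xs[i] :: xs.eraseIdx i) := by
  conv_lhs => rw [← List.take_append_drop i xs, List.drop_eq_getElem_cons h]
  rw [List.eraseIdx_eq_take_drop_succ]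
  exact List.perm_middle

theorem pvIndex?_eq_some_of (xs : List Int) (m : Int) (k : Nat) (hk : k < xs.length)
    (h1 : xs[k] = m) (h2 : ∀ q (hq : q < k), xs[q]'(by omega) ≠ m) :
    PySem.List.index? xs m = some k := by
  rw [PySem.List.index?_eq_some_iff]
  refine ⟨xs.take k, xs.drop (k + 1), ?_, by simp [List.length_take, Nat.min_def]; omega, ?_⟩
  · conv_lhs => rw [← List.take_append_drop k xs, List.drop_eq_getElem_cons hk]
    rw [h1]
  · intro hmem
    obtain ⟨q, hq, e⟩ := List.mem_take_iff_getElem.mp hmem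
    exact h2 q (by omega) e

theorem pvInv_init (v : List Int) :
    pvInv v (([] : List Int), v, v) (PySem.List.pyRange 0 (PySem.List.len v) 1) := by
  refine ⟨by simp, (PySem.List.map_pyGetD_pyRange_zero v 0).symm, rfl, ?_,
    PySem.List.pairwise_lt_pyRange_one 0 _, by simp, by simp⟩
  intro k hk; simp

-- a "bad" index for A: value -1 with some value ≥ -1 somewhere before it
def pvBadAt (v : List Int) (r : Int) : Prop :=
  pvVal v r = -1 ∧ ∃ i : Int, 0 ≤ i ∧ i < r ∧ -1 ≤ pvVal v i

theorem pvStep (v : List Int)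
    (st : List Int × List Int × List Int) (R : List Int) (hne : R ≠ [])
    (hInv : pvInv v st R) :
    (∃ jp R', pvInv v (pvBody st) R' ∧ R'.length + 1 = R.length ∧ ¬ pvBadAt v jp ∧
      ∀ r ∈ R, r = jp ∨ r ∈ R') ∨
    (D_index_ordering v ∧ ¬ (pvBody st).1.Nodup) := by
  obtain ⟨ils, nl, dm⟩ := st
  obtain ⟨hperm, hnl, hdlen, hdm, hRlt, hilsP, hPrem⟩ := hInv
  simp only at hperm hnl hdlen hdm hRlt hilsP hPrem
  subst hnl
  -- indices in R are in [0, n)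
  have hRmem : ∀ r ∈ R, 0 ≤ r ∧ r < (v.length : Int) := by
    intro r hr
    have : r ∈ PySem.List.pyRange 0 (PySem.List.len v) 1 :=
      hperm.subset (List.mem_append_right _ hr)
    simpa [PySem.List.len_eq] using PySem.List.mem_pyRange_one.mp this
  have hval : ∀ r ∈ R, ∀ (h : r.toNat < v.length), pvVal v r = v[r.toNat] := by
    intro r hr h
    have := hRmem r hr
    exact PySem.List.pyGetD_eq_getElem v 0 this.1 (by omega)
  -- max of new_list
  have hnlne : R.map (pvVal v) ≠ [] := by
    intro h; exact hne (List.map_eq_nil_iff.mp h)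
  obtain ⟨m, hm⟩ : ∃ m, PySem.List.max? (R.map (pvVal v)) (fun x => x) = some m := by
    cases h : PySem.List.max? (R.map (pvVal v)) (fun x => x) with
    | none => exact absurd ((PySem.List.max?_eq_none_iff _ _).mp h) hnlne
    | some m => exact ⟨m, rfl⟩
  have hm_max : ∀ y ∈ R.map (pvVal v), y ≤ m := by
    intro y hy; exact PySem.List.max?_isMax (key := fun x => x) hm y hy
  -- first occurrence of m in new_list
  obtain ⟨p, hp⟩ : ∃ p, PySem.List.index? (R.map (pvVal v)) m = some p := by
    have : m ∈ R.map (pvVal v) := PySem.List.max?_mem hm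
    cases h : PySem.List.index? (R.map (pvVal v)) m with
    | none => exact absurd ((PySem.List.index?_eq_none_iff _ m).mp h) (by simp [this])
    | some p => exact ⟨p, rfl⟩
  obtain ⟨hplen, hpval, hpmin⟩ := PySem.List.getElem_of_index?_eq_some hp
  have hpR : p < R.length := by simpa using hplen
  -- the chosen index j* = R[p]
  set j : Int := R[p] with hj
  have hjmem : j ∈ R := List.getElem_mem _
  have hjb := hRmem j hjmem
  have hjlt : j.toNat < v.length := by omega
  have hvalj : pvVal v j = m := by
    have h2 : (R.map (pvVal v))[p]'hplen = pvVal v j := by simp [hj]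
    omega
  have hvj : v.getD j.toNat 0 = m := by
    rw [List.getD_eq_getElem _ _ hjlt, ← hval j hjmem hjlt]; exact hvalj
  have hjnotin : j ∉ ils := by
    intro h; exact pvP_irrefl v j (hPrem j h j hjmem)
  -- an unpicked index strictly before j* never holds the value m
  have hunpicked : ∀ q : Nat, q < j.toNat → (q : Int) ∉ ils → q < v.length →
      v.getD q 0 ≠ m := by
    intro q hq hmem hqv
    have hqR : (q : Int) ∈ R := by
      have hmq : (q : Int) ∈ ils ++ R := hperm.symm.subset
        (by rw [PySem.List.mem_pyRange_one]
            refine ⟨by omega, by simp [PySem.List.len_eq]; omega⟩)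
      rcases List.mem_append.mp hmq with h | h
      · exact absurd h hmem
      · exact h
    obtain ⟨qi, hqi, hqie⟩ := List.mem_iff_getElem.mp hqR
    have hne' : qi < p := by
      rcases Nat.lt_trichotomy qi p with h | h | h
      · exact h
      · exfalso; subst h; rw [hqie] at hj; omega
      · exfalso
        have := List.pairwise_iff_getElem.mp hRlt p qi hpR hqi h
        rw [hqie] at this; omega
    intro hcon
    have hnem : (R.map (pvVal v))[qi]'(by simpa using hqi) ≠ m := hpmin qi hne'
    apply hnem
    have hvq : pvVal v (q : Int) = v[q]'hqv :=
      PySem.List.pyGetD_eq_getElem v 0 (by omega) (by simpa using hqv)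
    rw [List.getD_eq_getElem _ _ hqv] at hcon
    simp [hqie, hvq, hcon]
  -- a picked index always has value ≥ -1 when the current max is -1
  have hpickedge : ∀ q : Nat, (q : Int) ∈ ils → q < v.length → m = -1 →
      -1 ≤ v.getD q 0 := by
    intro q hmem hqv hm1
    have hPq : pvP v (q : Int) j := hPrem _ hmem j hjmem
    have hvq : pvVal v (q : Int) = v[q]'hqv :=
      PySem.List.pyGetD_eq_getElem v 0 (by omega) (by simpa using hqv)
    rw [List.getD_eq_getElem _ _ hqv]
    simp only [pvP] at hPq
    omega
  by_cases hbadc : m = -1 ∧ ∃ q : Nat, q < j.toNat ∧ (q : Int) ∈ ils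
  · -- BAD step: a sentinel -1 sits before j*, A picks an already-picked index
    obtain ⟨hm1, q0, hq0lt, hq0mem⟩ := hbadc
    have hq0v : q0 < v.length := by omega
    right
    constructor
    · -- this is exactly the D_ situation
      have hvjj : v[j.toNat]'hjlt = -1 := by
        rw [← List.getD_eq_getElem _ 0 hjlt]; omega
      refine ⟨⟨j.toNat, hjlt⟩, hvjj, ⟨q0, hq0v⟩, hq0lt, ?_⟩
      have := hpickedge q0 hq0mem hq0v hm1
      rw [List.getD_eq_getElem _ _ hq0v] at this
      exact this
    · -- the picked slot is the first -1 in dummy, an already-picked index: duplicate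
      have hq0dm : dm[q0]'(by omega) = m := by
        rw [← List.getD_eq_getElem _ 0 (by omega : q0 < dm.length), hdm q0 hq0v,
          if_pos hq0mem, hm1]
      obtain ⟨k, hk⟩ : ∃ k, PySem.List.index? dm m = some k := by
        cases h : PySem.List.index? dm m with
        | none =>
          exact absurd ((PySem.List.index?_eq_none_iff dm m).mp h)
            (by simp [← hq0dm, List.getElem_mem])
        | some k => exact ⟨k, rfl⟩
      obtain ⟨hklen, hkval, hkmin⟩ := PySem.List.getElem_of_index?_eq_some hk
      have hkq0 : k ≤ q0 := by
        by_contra h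
        exact hkmin q0 (by omega) hq0dm
      have hkils : (k : Int) ∈ ils := by
        by_contra hmem
        apply hunpicked k (by omega) hmem (by omega)
        have hh := hdm k (by omega)
        rw [if_neg hmem] at hh
        rw [← hh, List.getD_eq_getElem _ _ hklen]
        exact hkval
      have hfst : (pvBody (ils, R.map (pvVal v), dm)).1 = ils ++ [(k : Int)] := by
        have hpop : PySem.List.pop? (R.map (pvVal v)) (p : Int) =
            some ((R.map (pvVal v))[p]'hplen, (R.map (pvVal v)).eraseIdx p) :=
          PySem.List.pop?_natCast _ p hplen
        simp only [pvBody, hm, hk, hp, hpop]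
      rw [hfst]
      intro hnd
      exact (List.disjoint_of_nodup_append hnd) hkils (List.mem_singleton_self _)
  · -- GOOD step: the dummy lookup finds exactly j*
    left
    have hidm : PySem.List.index? dm m = some j.toNat := by
      apply pvIndex?_eq_some_of dm m j.toNat (by omega)
      · have h1 : dm[j.toNat]'(by omega) = dm.getD j.toNat 0 :=
          (List.getD_eq_getElem _ _ (by omega)).symm
        rw [h1, hdm j.toNat hjlt, if_neg (by rwa [Int.toNat_of_nonneg hjb.1])]
        exact hvj
      · intro q hq
        have hqv : q < v.length := by omega
        have h1 : dm[q]'(by omega) = dm.getD q 0 :=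
          (List.getD_eq_getElem _ _ (by omega)).symm
        rw [h1, hdm q hqv]
        by_cases hmem : (q : Int) ∈ ils
        · rw [if_pos hmem]
          intro hcon
          exact hbadc ⟨hcon.symm, q, hq, hmem⟩
        · rw [if_neg hmem]
          exact hunpicked q hq hmem hqv
    -- the pop on new_list
    have hpop : PySem.List.pop? (R.map (pvVal v)) (p : Int) =
        some ((R.map (pvVal v))[p]'hplen, (R.map (pvVal v)).eraseIdx p) :=
      PySem.List.pop?_natCast _ p hplen
    -- compute the body
    have hbody : pvBody (ils, R.map (pvVal v), dm) =
        (ils ++ [((j.toNat : Nat) : Int)], (R.map (pvVal v)).eraseIdx p, dm.set j.toNat (-1)) := by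
      simp only [pvBody, hm, hidm, hp, hpop]
    have hjcast : ((j.toNat : Nat) : Int) = j := Int.toNat_of_nonneg hjb.1
    have hRsplit : R.Perm (j :: R.eraseIdx p) := pvCons_eraseIdx R p hpR
    have hRsub : R.eraseIdx p ⊆ R := (List.eraseIdx_sublist R p).subset
    refine ⟨j, R.eraseIdx p, ?_, by rw [List.length_eraseIdx_of_lt hpR]; omega, ?_, ?_⟩
    · -- the invariant is preserved
      rw [hbody, hjcast]
      -- for r remaining after the pick: pvP j r
      have hPj : ∀ r ∈ R.eraseIdx p, pvP v j r := by
        intro r hr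
        have hrR : r ∈ R := hRsub hr
        have hrval : pvVal v r ≤ m := by
          have : pvVal v r ∈ R.map (pvVal v) := List.mem_map_of_mem hrR
          exact hm_max _ this
        rw [List.eraseIdx_eq_take_drop_succ] at hr
        rcases List.mem_append.mp hr with h | h
        · -- before position p: value ≠ m by minimality of the first occurrence
          obtain ⟨q, hq, e⟩ := List.mem_take_iff_getElem.mp h
          have hqp : q < p := by omega
          have hnem : (R.map (pvVal v))[q]'(by simp; omega) ≠ m := hpmin q hqp
          rw [List.getElem_map] at hnem
          rw [e] at hnem
          left; rw [hvalj]; omega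
        · -- after position p: index larger than j*
          obtain ⟨q, hq, e⟩ := List.mem_iff_getElem.mp h
          have hq' : p + 1 + q < R.length := by
            rw [List.length_drop] at hq; omega
          rw [List.getElem_drop] at e
          have hlt : j < r := by
            have := List.pairwise_iff_getElem.mp hRlt p (p + 1 + q) hpR hq' (by omega)
            rw [e] at this; exact this
          rcases lt_or_eq_of_le hrval with h' | h'
          · left; omega
          · right; rw [hvalj]; exact ⟨h'.symm ▸ rfl, hlt⟩
      refine ⟨?_, ?_, ?_, ?_, ?_, ?_, ?_⟩
      · -- permutation
        show ((ils ++ [j]) ++ R.eraseIdx p).Perm _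
        rw [List.append_assoc]
        exact (List.Perm.append_left ils (by simpa using hRsplit.symm)).trans hperm
      · show (List.map (pvVal v) R).eraseIdx p = _
        rw [List.eraseIdx_map]
      · simp [hdlen]
      · intro k hk
        simp only
        have hklen : k < (dm.set j.toNat (-1)).length := by simp; omega
        rw [List.getD_eq_getElem _ _ hklen]
        by_cases hkj : k = j.toNat
        · subst hkj
          rw [List.getElem_set_self (by omega)]
          rw [if_pos (List.mem_append_right _ (by rw [List.mem_singleton]; exact hjcast))]
        · rw [List.getElem_set_ne (by omega)]
          rw [← List.getD_eq_getElem _ 0 (by omega), hdm k hk]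
          have hcong : ((k : Int) ∈ ils ++ [j]) ↔ ((k : Int) ∈ ils) := by
            simp only [List.mem_append, List.mem_singleton]
            constructor
            · rintro (h | h)
              · exact h
              · exfalso; apply hkj; omega
            · exact Or.inl
          rw [if_congr hcong rfl rfl]
      · exact hRlt.sublist (List.eraseIdx_sublist R p)
      · -- picked list stays strictly lex-sorted
        simp only
        rw [List.pairwise_append]
        exact ⟨hilsP, by simp, by
          intro a ha b hb
          rw [List.mem_singleton] at hb
          subst hb
          exact hPrem a ha j hjmem⟩
      · intro i hi r hr
        simp only at hi
        rcases List.mem_append.mp hi with h | h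
        · exact hPrem i h r (hRsub hr)
        · rw [List.mem_singleton] at h; subst h; exact hPj r hr
    · -- the picked index j* is not a "bad" index
      rintro ⟨hm1, i, hi0, hij, hiv⟩
      have hm1' : m = -1 := by rw [← hvalj]; exact hm1
      have hiv' : i.toNat < v.length := by omega
      by_cases hmem : i ∈ ils
      · refine hbadc ⟨hm1', i.toNat, by omega, ?_⟩
        rwa [Int.toNat_of_nonneg hi0]
      · have := hunpicked i.toNat (by omega) (by rwa [Int.toNat_of_nonneg hi0]) hiv'
        apply this
        rw [List.getD_eq_getElem _ _ hiv']
        have hvi : pvVal v i = v[i.toNat]'hiv' :=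
          PySem.List.pyGetD_eq_getElem v 0 hi0 (by omega)
        have hile : pvVal v i ≤ m := by
          -- i is unpicked, hence in R, hence its value is at most the max
          have hiR : i ∈ R := by
            have hmq : i ∈ ils ++ R := hperm.symm.subset
              (by rw [PySem.List.mem_pyRange_one]
                  refine ⟨hi0, by simp [PySem.List.len_eq]; omega⟩)
            rcases List.mem_append.mp hmq with h | h
            · exact absurd h hmem
            · exact h
          exact hm_max _ (List.mem_map_of_mem hiR)
        omega
    · -- every element of R is either the pick or still remaining
      intro r hr
      have := hRsplit.subset hr
      rcases List.mem_cons.mp this with h | h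
      · exact Or.inl h
      · exact Or.inr h

theorem pvBody_fst (st : List Int × List Int × List Int) :
    (pvBody st).1 = st.1 ∨ ∃ x, (pvBody st).1 = st.1 ++ [x] := by
  unfold pvBody
  repeat' split
  all_goals first | exact Or.inl rfl | exact Or.inr ⟨_, rfl⟩

theorem pvFoldl_notNodup :
    ∀ (l : List Int) (st : List Int × List Int × List Int), ¬ st.1.Nodup →
      ¬ ((l.foldl (fun st _ => pvBody st) st).1.Nodup) := by
  intro l
  induction l with
  | nil => intro st h; simpa using h
  | cons a l ih =>
    intro st h
    rw [List.foldl_cons]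
    refine ih (pvBody st) ?_
    rcases pvBody_fst st with heq | ⟨x, heq⟩
    · rw [heq]; exact h
    · rw [heq]
      intro hnd
      exact h (hnd.sublist (List.sublist_append_left _ _))

theorem pvLoop (v : List Int) :
    ∀ (l : List Int) (st : List Int × List Int × List Int) (R : List Int),
      pvInv v st R → R.length = l.length →
      (pvInv v (l.foldl (fun st _ => pvBody st) st) [] ∧ ∀ r ∈ R, ¬ pvBadAt v r) ∨
      (D_index_ordering v ∧ ¬ (l.foldl (fun st _ => pvBody st) st).1.Nodup) := by
  intro l
  induction l with
  | nil =>
    intro st R hInv hlen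
    rw [List.length_nil, List.length_eq_zero_iff] at hlen
    subst hlen
    exact Or.inl ⟨by simpa using hInv, by simp⟩
  | cons a l ih =>
    intro st R hInv hlen
    have hne : R ≠ [] := by intro h; subst h; simp at hlen
    rw [List.foldl_cons]
    rcases pvStep v st R hne hInv with ⟨jp, R', hInv', hlen', hnb, hcover⟩ | ⟨hd, hnd⟩
    · rcases ih (pvBody st) R' hInv' (by simp at hlen ⊢; omega) with ⟨hfin, hnb'⟩ | hbad
      · refine Or.inl ⟨hfin, ?_⟩
        intro r hr
        rcases hcover r hr with rfl | hr'
        · exact hnb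
        · exact hnb' r hr'
      · exact Or.inr hbad
    · exact Or.inr ⟨hd, pvFoldl_notNodup l (pvBody st) hnd⟩

-- ===== VERDICT (by name: the statement is the Claim_ definition above) =====
theorem index_ordering_spec : Claim_unchanged_index_ordering := by
  intro v _hdom
  unfold Spec_index_ordering
  intro hD
  rcases pvLoop v (PySem.List.pyRange 0 (PySem.List.len v) 1)
      (([] : List Int), v, v) (PySem.List.pyRange 0 (PySem.List.len v) 1)
      (pvInv_init v) rfl with ⟨hInv, _⟩ | ⟨hd, _⟩
  · obtain ⟨hperm, _, _, _, _, hpair, _⟩ := hInv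
    rw [List.append_nil] at hperm
    rw [pvA_eq_foldl v]
    exact (pvAlt_unique v _ hperm hpair).symm
  · exact absurd hd hD

theorem index_ordering_changed : Claim_changed_index_ordering := by
  unfold Claim_changed_index_ordering; decide

theorem index_ordering_tight : Claim_exact_index_ordering := by
  intro v _hdom hDv heq
  have haltnodup : (index_ordering_alt v).Nodup :=
    ((pvAlt_perm v).nodup_iff).mpr (PySem.List.nodup_pyRange_one 0 _)
  rw [pvA_eq_foldl v] at heq
  rcases pvLoop v (PySem.List.pyRange 0 (PySem.List.len v) 1)
      (([] : List Int), v, v) (PySem.List.pyRange 0 (PySem.List.len v) 1)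
      (pvInv_init v) rfl with ⟨_, hnb⟩ | ⟨_, hnd⟩
  · obtain ⟨j, hvj, i, hij, hvi⟩ := hDv
    apply hnb ((j : Nat) : Int)
    · rw [PySem.List.mem_pyRange_one, PySem.List.len_eq]
      have := j.isLt
      omega
    · unfold pvBadAt pvVal
      refine ⟨?_, ((i : Nat) : Int), by omega, by exact_mod_cast hij, ?_⟩
      · rw [PySem.List.pyGetD_eq_getElem v 0 (by omega) (by exact_mod_cast j.isLt)]
        simpa using hvj
      · rw [PySem.List.pyGetD_eq_getElem v 0 (by omega) (by exact_mod_cast i.isLt)]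
        simpa using hvi
  · exact hnd (heq ▸ haltnodup)
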